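-- pv_equiv track=rewrite | github.com/LorenzoAndrees/Codificacion-Decodificacion | decodificador.py | productMatrix
-- ===== SOURCE A (Python) =====
-- def pair(A):
--     count = 0
--     for i in A:
--         if i == 1:
--             count += 1
--     if count%2 == 0:
--         return 0
--     return 1
--
-- def productMatrix(A,B):
--     C = []
--     temp = [0 for col in range(len(A))]
--     for j in range(len(B[0])):
--         for k in range(len(B)):
--             temp[k] = int(A[k])*B[k][j]
--         C.append(pair(temp))
--     return C
-- ===== SOURCE B (Python) =====
-- def productMatrix(A, B):
--     C = [0] * len(B[0])
--     for k in range(len(B)):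
--         row = B[k]
--         for j in range(len(C)):
--             C[j] = (C[j] + (int(A[k]) * row[j] == 1)) % 2
--     return C
-- ===== Notes on version B (the rewrite author's own statement) =====
-- stated objective: simpler
-- what changed: B replaces A's column-major count-then-reduce (a temp buffer of all products per column plus a separate parity-counting helper pair) by a single row-major pass that accumulates each column's parity incrementally in the result vector, with no temp buffer and no helper.
import Mathlib
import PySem

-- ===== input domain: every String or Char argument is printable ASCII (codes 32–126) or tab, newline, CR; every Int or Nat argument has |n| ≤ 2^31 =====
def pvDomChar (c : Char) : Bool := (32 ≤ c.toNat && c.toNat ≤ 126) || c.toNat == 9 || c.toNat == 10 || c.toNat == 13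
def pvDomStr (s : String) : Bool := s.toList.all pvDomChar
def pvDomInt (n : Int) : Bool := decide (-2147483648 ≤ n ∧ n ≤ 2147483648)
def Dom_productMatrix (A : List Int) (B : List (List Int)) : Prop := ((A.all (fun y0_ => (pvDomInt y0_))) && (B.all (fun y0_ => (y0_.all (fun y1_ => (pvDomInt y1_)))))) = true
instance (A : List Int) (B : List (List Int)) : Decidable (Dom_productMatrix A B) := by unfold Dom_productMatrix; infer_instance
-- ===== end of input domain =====

-- B replaces A's column-major count-then-reduce (temp buffer + parity-counting helper) by a
-- single row-major pass that accumulates each column's parity in the result vector; same cost.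

-- ===== PORT A =====
def pairA (l : List Int) : Int :=
  let count := l.foldl (fun c i => if i = 1 then c + 1 else c) (0 : Int)
  if PySem.Int.mod count 2 = 0 then 0 else 1

def productMatrix (A : List Int) (B : List (List Int)) : List Int :=
  let temp0 : List Int := (PySem.List.pyRange 0 (A.length : Int) 1).map (fun _ => (0 : Int))
  ((PySem.List.pyRange 0 ((PySem.List.pyGetD B 0 []).length : Int) 1).foldl
    (fun (st : List Int × List Int) j =>
      let temp := (PySem.List.pyRange 0 (B.length : Int) 1).foldl
        (fun t k => PySem.List.pySetD t k
          (PySem.List.pyGetD A k 0 * PySem.List.pyGetD (PySem.List.pyGetD B k []) j 0)) st.2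
      (st.1 ++ [pairA temp], temp))
    (([] : List Int), temp0)).1

def productMatrix_alt (A : List Int) (B : List (List Int)) : List Int :=
  let C0 : List Int := List.replicate (PySem.List.pyGetD B 0 []).length (0 : Int)
  (PySem.List.pyRange 0 (B.length : Int) 1).foldl
    (fun C k =>
      let row := PySem.List.pyGetD B k []
      (PySem.List.pyRange 0 (C.length : Int) 1).foldl
        (fun C' j => PySem.List.pySetD C' j
          (PySem.Int.mod (PySem.List.pyGetD C' j 0 +
            (if PySem.List.pyGetD A k 0 * PySem.List.pyGetD row j 0 = 1 then 1 else 0)) 2)) C)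
    C0

-- ===== PRECONDITION & SPEC =====
-- Pre_ = exactly the inputs on which the Python A returns: B nonempty (A indexes B[0]), and
-- either the first row is empty (the loops never read an element) or len(B) <= len(A) (A[k]
-- and temp[k] are indexed for k < len(B)) and every row has at least len(B[0]) elements
-- (B[k][j] is indexed for j < len(B[0])); on all other inputs A raises IndexError.
def Pre_productMatrix (A : List Int) (B : List (List Int)) : Prop :=
  B ≠ [] ∧ ((B.headD []).length = 0 ∨
    (B.length ≤ A.length ∧ ∀ r ∈ B, (B.headD []).length ≤ r.length))
instance (A : List Int) (B : List (List Int)) : Decidable (Pre_productMatrix A B) := by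
  unfold Pre_productMatrix; infer_instance

def pvWitness_productMatrix : List Int × List (List Int) := ([1, 0, 1], [[1, -1], [1, 1], [0, 1]])

def Spec_productMatrix (A : List Int) (B : List (List Int)) (out : List Int) : Prop := out = productMatrix_alt A B
instance (A : List Int) (B : List (List Int)) (out : List Int) : Decidable (Spec_productMatrix A B out) := by unfold Spec_productMatrix; infer_instance

-- ===== CLAIM (what is proved, stated in full; the proofs are below) =====
def Claim_equal_productMatrix : Prop := ∀ (A : List Int) (B : List (List Int)), Dom_productMatrix A B → Pre_productMatrix A B → Spec_productMatrix A B (productMatrix A B)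

-- ===== LEMMAS AND PROOFS =====
def pvVal (A : List Int) (B : List (List Int)) (j k : Nat) : Int :=
  (A.getD k 0) * ((B.getD k []).getD j 0)

def pvCnt (A : List Int) (B : List (List Int)) (j K : Nat) : Nat :=
  (List.range K).countP (fun k => pvVal A B j k == 1)

def pvTm (A : List Int) (B : List (List Int)) (j : Nat) : List Int :=
  (List.range A.length).map (fun i => if i < B.length then pvVal A B j i else 0)

def pvCk (A : List Int) (B : List (List Int)) (K : Nat) : List Int :=
  (List.range (B.getD 0 []).length).map (fun j => ((pvCnt A B j K % 2 : Nat) : Int))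

theorem map_getD_range (t : List Int) :
    (List.range t.length).map (fun i => t.getD i 0) = t := by
  apply List.ext_getElem
  · simp
  · intro i h1 h2
    simp [List.getD_eq_getElem?_getD, List.getElem?_eq_getElem h2]

theorem foldl_set_range (h : Nat → Int → Int) :
    ∀ (n : Nat) (t : List Int), n ≤ t.length →
    (List.range n).foldl (fun t' j => t'.set j (h j (t'.getD j 0))) t
      = (List.range t.length).map (fun i => if i < n then h i (t.getD i 0) else t.getD i 0) := by
  intro n
  induction n with
  | zero => intro t ht; simpa using (map_getD_range t).symm
  | succ n ih =>
    intro t ht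
    rw [List.range_succ, List.foldl_append, ih t (by omega)]
    have hm : ∀ i', i' < t.length →
        ((List.range t.length).map (fun i => if i < n then h i (t.getD i 0) else t.getD i 0)).getD i' 0
        = if i' < n then h i' (t.getD i' 0) else t.getD i' 0 := by
      intro i' hi'
      simp [List.getD_eq_getElem?_getD, hi']
    apply List.ext_getElem
    · simp
    · intro i h1 h2
      simp only [List.foldl_cons, List.foldl_nil, List.getElem_set, List.getElem_map,
        List.getElem_range, List.length_map, List.length_range] at h1 h2 ⊢
      rw [hm n (by omega)]
      by_cases hi : n = i
      · subst hi
        simp [show n < n + 1 by omega]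
      · rw [if_neg hi]
        split_ifs <;> first | rfl | omega

-- ==== normalized forms of the two ports ====
theorem portA_eq (A : List Int) (B : List (List Int)) :
    productMatrix A B = ((List.range (B.getD 0 []).length).foldl
      (fun (st : List Int × List Int) j =>
        let temp := (List.range B.length).foldl (fun t k => t.set k (pvVal A B j k)) st.2
        (st.1 ++ [pairA temp], temp))
      (([] : List Int), List.replicate A.length 0)).1 := by
  simp [productMatrix, pvVal, PySem.List.pyRange_one, List.foldl_map,
    PySem.List.pyGetD_ofNat', Function.comp_def, List.map_const']

theorem portB_eq (A : List Int) (B : List (List Int)) :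
    productMatrix_alt A B = (List.range B.length).foldl
      (fun C k => (List.range C.length).foldl
        (fun C' j => C'.set j (PySem.Int.mod (C'.getD j 0 +
          (if pvVal A B j k = 1 then 1 else 0)) 2)) C)
      (List.replicate (B.getD 0 []).length 0) := by
  simp [productMatrix_alt, pvVal, PySem.List.pyRange_one, List.foldl_map,
    PySem.List.pyGetD_ofNat']

-- ==== A side ====
theorem innerA_eq (A : List Int) (B : List (List Int)) (j : Nat)
    (hn : B.length ≤ A.length) (t : List Int) (ht : t.length = A.length)
    (hz : ∀ i, B.length ≤ i → t.getD i 0 = 0) :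
    (List.range B.length).foldl (fun t k => t.set k (pvVal A B j k)) t = pvTm A B j := by
  have := foldl_set_range (fun k _ => pvVal A B j k) B.length t (by omega)
  simp only at this
  rw [this, pvTm, ht]
  apply List.map_congr_left
  intro i hi
  simp only [List.mem_range] at hi
  by_cases h : i < B.length
  · simp [h]
  · have h0 := hz i (by omega)
    rw [List.getD_eq_getElem?_getD] at h0
    simp [h, h0]

theorem pvTm_len (A : List Int) (B : List (List Int)) (j : Nat) :
    (pvTm A B j).length = A.length := by simp [pvTm]

theorem pvTm_z (A : List Int) (B : List (List Int)) (j i : Nat) (h : B.length ≤ i) :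
    (pvTm A B j).getD i 0 = 0 := by
  by_cases hi : i < A.length
  · simp [pvTm, List.getD_eq_getElem?_getD, hi]; omega
  · rw [List.getD_eq_getElem?_getD, List.getElem?_eq_none (by simp [pvTm]; omega)]
    rfl

theorem outerA (A : List Int) (B : List (List Int)) (hn : B.length ≤ A.length) :
    ∀ (js : List Nat) (C t : List Int), t.length = A.length →
    (∀ i, B.length ≤ i → t.getD i 0 = 0) →
    ((js.foldl (fun (st : List Int × List Int) j =>
        let temp := (List.range B.length).foldl (fun t k => t.set k (pvVal A B j k)) st.2
        (st.1 ++ [pairA temp], temp)) (C, t)).1)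
      = C ++ js.map (fun j => pairA (pvTm A B j)) := by
  intro js
  induction js with
  | nil => intro C t _ _; simp
  | cons j js ih =>
    intro C t ht hz
    simp only [List.foldl_cons, List.map_cons]
    rw [innerA_eq A B j hn t ht hz]
    rw [ih (C ++ [pairA (pvTm A B j)]) (pvTm A B j) (pvTm_len A B j) (fun i h => pvTm_z A B j i h)]
    simp

theorem pairA_Tm (A : List Int) (B : List (List Int)) (j : Nat) (hn : B.length ≤ A.length) :
    pairA (pvTm A B j) = ((pvCnt A B j B.length % 2 : Nat) : Int) := by
  have hc : List.foldl (fun c i => if i = 1 then c + 1 else c) (0 : Int) (pvTm A B j)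
      = ((pvCnt A B j B.length : Nat) : Int) := by
    have := PySem.List.foldl_count_if (fun i => i == 1) (pvTm A B j) 0
    simp only [beq_iff_eq] at this
    rw [this]
    have hsplit : A.length = B.length + (A.length - B.length) := by omega
    rw [pvCnt, pvTm, hsplit, List.range_add, List.map_append, List.countP_append]
    have h2 : ((((List.range (A.length - B.length)).map (fun k => B.length + k)).map
        (fun i => if i < B.length then pvVal A B j i else 0)).countP (fun i => i == 1)) = 0 := by
      rw [List.countP_eq_zero]
      intro a ha
      simp only [List.map_map, List.mem_map, List.mem_range, Function.comp] at ha
      obtain ⟨k, _, rfl⟩ := ha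
      simp [show ¬ (B.length + k < B.length) by omega]
    rw [h2]
    simp only [List.countP_map, Function.comp_def, Nat.add_zero, zero_add, Nat.cast_inj]
    apply List.countP_congr
    intro k hk
    simp only [List.mem_range] at hk
    simp [hk]
  simp only [pairA]
  rw [hc]
  rw [PySem.Int.mod_eq_emod_of_pos (by norm_num)]
  have h2 : pvCnt A B j B.length % 2 = 0 ∨ pvCnt A B j B.length % 2 = 1 := by omega
  rcases h2 with h2 | h2 <;> simp [h2] <;> omega

-- ==== B side ====
theorem stepB (A : List Int) (B : List (List Int)) (k : Nat) (t : List Int)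
    (ht : t.length = (B.getD 0 []).length) :
    (List.range t.length).foldl
      (fun C' j => C'.set j (PySem.Int.mod (C'.getD j 0 +
        (if pvVal A B j k = 1 then 1 else 0)) 2)) t
    = (List.range (B.getD 0 []).length).map
        (fun j => PySem.Int.mod (t.getD j 0 + (if pvVal A B j k = 1 then 1 else 0)) 2) := by
  have := foldl_set_range
    (fun j v => PySem.Int.mod (v + (if pvVal A B j k = 1 then 1 else 0)) 2) t.length t le_rfl
  simp only at this
  rw [this, ht]
  apply List.map_congr_left
  intro i hi
  simp only [List.mem_range] at hi
  rw [if_pos hi]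

theorem pvCk_getD (A : List Int) (B : List (List Int)) (K j : Nat)
    (hj : j < (B.getD 0 []).length) :
    (pvCk A B K).getD j 0 = ((pvCnt A B j K % 2 : Nat) : Int) := by
  rw [List.getD_eq_getElem?_getD] at hj ⊢
  simp [pvCk, hj]

theorem outerB (A : List Int) (B : List (List Int)) :
    ∀ (K : Nat),
    ((List.range K).foldl
      (fun C k => (List.range C.length).foldl
        (fun C' j => C'.set j (PySem.Int.mod (C'.getD j 0 +
          (if pvVal A B j k = 1 then 1 else 0)) 2)) C)
      (List.replicate (B.getD 0 []).length 0)) = pvCk A B K := by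
  intro K
  induction K with
  | zero => simp [pvCk, pvCnt, List.map_const']
  | succ K ih =>
    rw [List.range_succ, List.foldl_append, ih]
    simp only [List.foldl_cons, List.foldl_nil]
    have hlen : (pvCk A B K).length = (B.getD 0 []).length := by simp [pvCk]
    rw [stepB A B K (pvCk A B K) hlen]
    conv_rhs => rw [pvCk]
    apply List.map_congr_left
    intro j hj
    simp only [List.mem_range] at hj
    rw [pvCk_getD A B K j hj]
    have hstep : pvCnt A B j (K + 1)
        = pvCnt A B j K + (if pvVal A B j K = 1 then 1 else 0) := by
      rw [pvCnt, pvCnt, List.range_succ, List.countP_append]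
      by_cases h : pvVal A B j K = 1 <;> simp [h]
    rw [hstep, PySem.Int.mod_eq_emod_of_pos (by norm_num)]
    split_ifs <;> push_cast <;> omega

-- ==== main ====
theorem main_eq (A : List Int) (B : List (List Int)) (hpre : Pre_productMatrix A B) :
    productMatrix A B = productMatrix_alt A B := by
  rw [portA_eq, portB_eq]
  rcases hpre with ⟨hne, hm | ⟨hn, _⟩⟩
  · -- first row empty: both sides are []
    have hm' : (B.getD 0 []).length = 0 := by
      cases B with
      | nil => simp at hne
      | cons b bs => simpa using hm
    rw [hm']
    simp only [List.range_zero, List.foldl_nil, List.replicate_zero]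
    have : ∀ (l : List Nat), (l.foldl
      (fun C k => (List.range C.length).foldl
        (fun C' j => C'.set j (PySem.Int.mod (C'.getD j 0 +
          (if pvVal A B j k = 1 then 1 else 0)) 2)) C) ([] : List Int)) = [] := by
      intro l
      induction l with
      | nil => rfl
      | cons a l ih => simpa using ih
    rw [this]
  · rw [outerA A B hn (List.range (B.getD 0 []).length) [] (List.replicate A.length 0)
      (by simp) (by
        intro i _
        rw [List.getD_eq_getElem?_getD, List.getElem?_replicate]
        split_ifs <;> rfl)]
    rw [outerB A B B.length]
    simp only [List.nil_append, pvCk]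
    apply List.map_congr_left
    intro j _
    exact pairA_Tm A B j hn

-- ===== VERDICT (by name: the statement is the Claim_ definition above) =====
theorem productMatrix_spec : Claim_equal_productMatrix := by
  intro A B _ hpre
  unfold Spec_productMatrix
  exact main_eq A B hpre
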